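-- pv_equiv track=rewrite | github.com/KlaasJanssen/Advent-of-code-2023 | D12P1_hot_springs.py | check_configuration
-- ===== SOURCE A (Python) =====
-- def check_configuration(spots, damaged):
--     spots += "."
--     current_damaged = 0
--     for char in spots:
--         if char == "." and current_damaged > 0:
--             if current_damaged == damaged[0]:
--                 damaged.pop(0)
--                 current_damaged = 0
--             else:
--                 return False
--         if char == "#":
--             if len(damaged) == 0:
--                 return False
--             else:
--                 current_damaged += 1
--
--     if len(damaged) == 0:
--         return True
--     else:
--         return False
-- ===== SOURCE B (Python) =====
-- def check_configuration(spots, damaged):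
--     # Phase 1: tokenize -- split on '.', take each segment's '#' count as a run
--     # ('?' and any other non-'.'/'#' character is neutral and does not break a run).
--     runs = [seg.count("#") for seg in spots.split(".")]
--     # Phase 2: match the runs against the expected group sizes, popping matches.
--     for r in runs:
--         if r == 0:
--             continue
--         if not damaged or r != damaged[0]:
--             return False
--         damaged.pop(0)
--     return not damaged
-- ===== Notes on version B (the rewrite author's own statement) =====
-- stated objective: alternative
-- what changed: Replaces A's single streaming state machine (counter + interleaved early returns over a sentinel-appended string) with a two-phase build-then-compare: tokenize the string into '#'-run lengths via split('.')/count('#'), then match that run list against the expected groups.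
import Mathlib
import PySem

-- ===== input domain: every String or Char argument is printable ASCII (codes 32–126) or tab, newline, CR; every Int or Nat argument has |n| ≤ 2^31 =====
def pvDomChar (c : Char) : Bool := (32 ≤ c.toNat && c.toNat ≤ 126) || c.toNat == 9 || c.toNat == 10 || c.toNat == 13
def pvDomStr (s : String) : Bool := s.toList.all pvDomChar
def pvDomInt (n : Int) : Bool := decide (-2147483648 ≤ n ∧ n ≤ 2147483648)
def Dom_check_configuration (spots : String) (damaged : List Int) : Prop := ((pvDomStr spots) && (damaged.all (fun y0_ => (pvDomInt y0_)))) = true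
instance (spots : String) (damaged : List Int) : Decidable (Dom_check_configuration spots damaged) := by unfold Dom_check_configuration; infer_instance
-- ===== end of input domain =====

-- B rewrites A's streaming state machine as tokenize-then-compare (different decomposition;
-- a timing run measured B faster by a constant factor). The equality proved is about the
-- RETURN value; A pops matched leading groups from `damaged` in place, and B performs the
-- identical mutation in Python.

-- ===== PORT A =====
-- A's for-loop with early returns, as structural recursion over the characters of
-- spots + "." with the same state (current_damaged, damaged). Python's damaged[0] is
-- read only under current_damaged > 0, where damaged is provably nonempty; headD 0 is
-- exact there (A never raises).
def check_configuration_go (cs : List Char) (cur : Int) (damaged : List Int) : Bool :=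
  match cs with
  | [] => damaged.length = 0
  | c :: rest =>
    if c = '.' ∧ cur > 0 then
      if cur = damaged.headD 0 then
        check_configuration_go rest 0 (damaged.drop 1)
      else false
    else if c = '#' then
      if damaged.length = 0 then false
      else check_configuration_go rest (cur + 1) damaged
    else check_configuration_go rest cur damaged

def check_configuration (spots : String) (damaged : List Int) : Bool :=
  check_configuration_go (spots.toList ++ ['.']) 0 damaged

-- ===== PORT B =====
-- Phase 2 of Source B: match the run lengths against the expected groups.
def check_configuration_match (runs : List Int) (damaged : List Int) : Bool :=
  match runs, damaged with
  | [], damaged => damaged.isEmpty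
  | r :: rest, damaged =>
    if r = 0 then check_configuration_match rest damaged
    else
      match damaged with
      | [] => false
      | d :: ds => if r ≠ d then false else check_configuration_match rest ds

-- Phase 1 of Source B: spots.split(".") / seg.count("#") via the PySem primitives.
def check_configuration_alt (spots : String) (damaged : List Int) : Bool :=
  check_configuration_match
    ((PySem.Chars.splitOn spots.toList ['.']).map (fun seg => (PySem.Chars.count seg ['#'] : Int)))
    damaged

-- ===== PRECONDITION & SPEC =====
def Spec_check_configuration (spots : String) (damaged : List Int) (out : Bool) : Prop := out = check_configuration_alt spots damaged
instance (spots : String) (damaged : List Int) (out : Bool) : Decidable (Spec_check_configuration spots damaged out) := by unfold Spec_check_configuration; infer_instance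

-- ===== CLAIM (what is proved, stated in full; the proofs are below) =====
def Claim_equal_check_configuration : Prop := ∀ (spots : String) (damaged : List Int), Dom_check_configuration spots damaged → Spec_check_configuration spots damaged (check_configuration spots damaged)

-- ===== LEMMAS AND PROOFS =====

-- Fuel-free characterisation of PySem.Chars.splitOn s ['.'] (pending segment kept reversed).
def splitDotD (l : List Char) (cur : List Char) : List (List Char) :=
  match l with
  | [] => [cur.reverse]
  | c :: rest => if c = '.' then cur.reverse :: splitDotD rest [] else splitDotD rest (c :: cur)

theorem splitOn_go_dot (fuel : Nat) (l cur : List Char) (acc : List (List Char))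
    (h : l.length ≤ fuel) :
    PySem.Chars.splitOn.go ['.'] fuel l cur acc = acc.reverse ++ splitDotD l cur := by
  induction fuel generalizing l cur acc with
  | zero =>
    have : l = [] := by cases l <;> simp_all
    subst this
    simp [PySem.Chars.splitOn.go, splitDotD]
  | succ n ih =>
    cases l with
    | nil => simp [PySem.Chars.splitOn.go, splitDotD]
    | cons c rest =>
      simp only [PySem.Chars.splitOn.go, splitDotD]
      by_cases hc : c = '.'
      · subst hc
        rw [if_pos (by simp [List.isPrefixOf]),
          show List.drop (['.'].length) ('.' :: rest) = rest from rfl,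
          ih rest [] (cur.reverse :: acc) (by simpa using Nat.le_of_succ_le_succ h)]
        simp
      · have hpre : (['.'].isPrefixOf (c :: rest)) = false := by
          simp [List.isPrefixOf]; intro hh; exact absurd hh.symm hc
        simp only [hpre, Bool.false_eq_true, if_false]
        rw [ih rest (c :: cur) acc (by simpa using Nat.le_of_succ_le_succ h)]
        simp [hc]

theorem splitOn_dot (s : List Char) :
    PySem.Chars.splitOn s ['.'] = splitDotD s [] := by
  have := splitOn_go_dot (s.length + 1) s [] [] (by omega)
  simpa [PySem.Chars.splitOn] using this

theorem count_go_hash (fuel : Nat) (l : List Char) (acc : Nat) (h : l.length ≤ fuel) :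
    PySem.Chars.count.go ['#'] fuel l acc = acc + l.count '#' := by
  induction fuel generalizing l acc with
  | zero =>
    have : l = [] := by cases l <;> simp_all
    subst this
    simp [PySem.Chars.count.go]
  | succ n ih =>
    cases l with
    | nil => simp [PySem.Chars.count.go]
    | cons c rest =>
      simp only [PySem.Chars.count.go]
      by_cases hc : c = '#'
      · subst hc
        rw [if_pos (by simp [List.isPrefixOf]),
          show List.drop (['#'].length) ('#' :: rest) = rest from rfl,
          ih rest (acc + 1) (by simpa using Nat.le_of_succ_le_succ h)]
        simp
        omega
      · have hpre : (['#'].isPrefixOf (c :: rest)) = false := by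
          simp [List.isPrefixOf]; intro hh; exact absurd hh.symm hc
        simp only [hpre, Bool.false_eq_true, if_false]
        rw [ih rest acc (by simpa using Nat.le_of_succ_le_succ h)]
        simp [hc]

theorem count_hash (s : List Char) : PySem.Chars.count s ['#'] = s.count '#' := by
  have := count_go_hash s.length s 0 le_rfl
  simpa [PySem.Chars.count] using this

-- The head segment of splitDotD contains the whole pending segment.
theorem splitDotD_head (l cur : List Char) :
    ∃ seg rest, splitDotD l cur = seg :: rest ∧ cur.count '#' ≤ seg.count '#' := by
  induction l generalizing cur with
  | nil => exact ⟨cur.reverse, [], by simp [splitDotD], by simp⟩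
  | cons c rest ih =>
    by_cases hc : c = '.'
    · exact ⟨cur.reverse, splitDotD rest [], by simp [splitDotD, hc], by simp⟩
    · obtain ⟨seg, rs, heq, hle⟩ := ih (c :: cur)
      exact ⟨seg, rs, by simp [splitDotD, hc, heq], le_trans (by simp [List.count_cons]) hle⟩

-- One-step reductions of A's loop body.
theorem goDot_pos (cs : List Char) (cur : Int) (dm : List Int) (h : 0 < cur) :
    check_configuration_go ('.' :: cs) cur dm =
      match dm with
      | [] => false
      | d :: ds => if cur = d then check_configuration_go cs 0 ds else false := by
  cases dm with
  | nil =>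
    simp only [check_configuration_go]
    rw [if_pos ⟨by trivial, h⟩, if_neg (by simp; omega)]
  | cons d ds =>
    simp only [check_configuration_go]
    rw [if_pos ⟨by trivial, h⟩]
    simp

theorem goDot_zero (cs : List Char) (dm : List Int) :
    check_configuration_go ('.' :: cs) 0 dm = check_configuration_go cs 0 dm := by
  simp [check_configuration_go]

theorem goHash (cs : List Char) (cur : Int) (dm : List Int) :
    check_configuration_go ('#' :: cs) cur dm =
      (if dm.length = 0 then false else check_configuration_go cs (cur + 1) dm) := by
  simp [check_configuration_go]

theorem goOther (c : Char) (cs : List Char) (cur : Int) (dm : List Int)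
    (hc : c ≠ '.') (hh : c ≠ '#') :
    check_configuration_go (c :: cs) cur dm = check_configuration_go cs cur dm := by
  simp [check_configuration_go, hc, hh]

-- Main invariant: A's loop over cs ++ ['.'] with pending '#'-count of `pend`
-- equals B's matcher on the runs produced from cs with pending segment `pend`.
theorem go_eq_match (cs : List Char) (pend : List Char) (damaged : List Int) :
    check_configuration_go (cs ++ ['.']) ((pend.count '#' : Nat) : Int) damaged =
      check_configuration_match ((splitDotD cs pend).map (fun seg => ((seg.count '#' : Nat) : Int))) damaged := by
  induction cs generalizing pend damaged with
  | nil =>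
    simp only [List.nil_append, splitDotD, List.map, List.count_reverse]
    by_cases hp : pend.count '#' = 0
    · rw [hp, Nat.cast_zero, goDot_zero]
      cases damaged <;> simp [check_configuration_go, check_configuration_match]
    · rw [goDot_pos _ _ _ (by exact_mod_cast Nat.pos_of_ne_zero hp)]
      cases damaged with
      | nil => simp [check_configuration_match, hp]
      | cons d ds =>
        by_cases hd : ((pend.count '#' : Nat) : Int) = d
        · have hd0 : d ≠ 0 := by rw [← hd]; simpa using hp
          simp [check_configuration_match, check_configuration_go, hd, hd0]
          cases ds <;> simp
        · simp [check_configuration_match, hd, hp]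
  | cons c rest ih =>
    by_cases hc : c = '.'
    · subst hc
      simp only [List.cons_append, splitDotD, if_true, List.map_cons, List.count_reverse]
      by_cases hp : pend.count '#' = 0
      · rw [hp, Nat.cast_zero, goDot_zero]
        simpa [check_configuration_match, hp] using ih [] damaged
      · rw [goDot_pos _ _ _ (by exact_mod_cast Nat.pos_of_ne_zero hp)]
        cases damaged with
        | nil => simp [check_configuration_match, hp]
        | cons d ds =>
          have hB := ih [] ds
          simp only [List.count_nil, Nat.cast_zero] at hB
          by_cases hd : ((pend.count '#' : Nat) : Int) = d
          · have hd0 : d ≠ 0 := by rw [← hd]; simpa using hp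
            simp [check_configuration_match, hd, hd0, hB]
          · simp [check_configuration_match, hd, hp]
    · by_cases hh : c = '#'
      · subst hh
        have hsd : splitDotD ('#' :: rest) pend = splitDotD rest ('#' :: pend) := by
          simp [splitDotD]
        rw [List.cons_append, hsd, goHash]
        cases damaged with
        | nil =>
          obtain ⟨seg, rs, heq, hle⟩ := splitDotD_head rest ('#' :: pend)
          have hpos : seg.count '#' ≠ 0 := by
            simp at hle; omega
          rw [heq]
          simp [check_configuration_match, hpos]
        | cons d ds =>
          rw [if_neg (show ¬((d :: ds).length = 0) by simp)]
          have hcast : (((pend.count '#' : Nat) : Int) + 1) = ((('#' :: pend).count '#' : Nat) : Int) := by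
            simp
          rw [hcast]
          exact ih ('#' :: pend) (d :: ds)
      · have hsd : splitDotD (c :: rest) pend = splitDotD rest (c :: pend) := by
          simp [splitDotD, hc]
        rw [List.cons_append, hsd, goOther c _ _ _ hc hh]
        have hcast : ((pend.count '#' : Nat) : Int) = (((c :: pend).count '#' : Nat) : Int) := by
          simp [hh]
        rw [hcast]
        exact ih (c :: pend) damaged

-- ===== VERDICT (by name: the statement is the Claim_ definition above) =====
theorem check_configuration_spec : Claim_equal_check_configuration := by
  intro spots damaged _
  unfold Spec_check_configuration check_configuration check_configuration_alt
  rw [splitOn_dot]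
  have h := go_eq_match spots.toList [] damaged
  simpa [count_hash] using h
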